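-- pv_equiv track=rewrite | github.com/carc0032/cleancsv | CleanCSV.py | stitch_csv_records
-- ===== SOURCE A (Python) =====
-- def stitch_csv_records(text: str) -> tuple[str, dict]:
--     lines = text.split("\n")
--     physical = len(lines)
--
--     logical_lines: list[str] = []
--     buf_parts: list[str] = []
--     in_quotes = False
--     current_physical_count = 0
--     stitched_records = 0
--     max_physical = 1
--
--     def process_line_for_quotes(line: str, in_q: bool) -> bool:
--         i = 0
--         while i < len(line):
--             if line[i] == '"':
--                 # Escaped quote: ""
--                 if i + 1 < len(line) and line[i + 1] == '"':
--                     i += 2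
--                     continue
--                 in_q = not in_q
--             i += 1
--         return in_q
--
--     for line in lines:
--         current_physical_count += 1
--
--         if not buf_parts:
--             buf_parts.append(line)
--         else:
--             buf_parts.append("\n" + line)
--
--         in_quotes = process_line_for_quotes(line, in_quotes)
--
--         if not in_quotes:
--             combined = "".join(buf_parts)
--             logical_lines.append(combined)
--
--             if current_physical_count > 1:
--                 stitched_records += 1
--                 max_physical = max(max_physical, current_physical_count)
--
--             buf_parts = []
--             current_physical_count = 0
--
--     if buf_parts:
--         logical_lines.append("".join(buf_parts))
--         if current_physical_count > 1:
--             stitched_records += 1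
--             max_physical = max(max_physical, current_physical_count)
--
--     stitched_text = "\n".join(logical_lines)
--     stats = {
--         "physical_lines": physical,
--         "logical_lines": len(logical_lines),
--         "stitched_records": stitched_records,
--         "max_physical_per_record": max_physical,
--     }
--     return stitched_text, stats
-- ===== SOURCE B (Python) =====
-- def stitch_csv_records(text: str) -> tuple[str, dict]:
--     # One flat pass over the characters instead of splitting into lines first:
--     # the regrouped logical records joined by "\n" reproduce text verbatim,
--     # so only the statistics need computing.
--     n = len(text)
--     in_quotes = False
--     logical = 0            # records closed by an unquoted newline
--     newlines_in_rec = 0    # newlines inside the current (open) record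
--     total_newlines = 0
--     stitched = 0
--     max_physical = 1
--     i = 0
--     while i < n:
--         c = text[i]
--         if c == '"':
--             if i + 1 < n and text[i + 1] == '"':   # escaped quote ""
--                 i += 2
--                 continue
--             in_quotes = not in_quotes
--         elif c == "\n":
--             total_newlines += 1
--             if in_quotes:
--                 newlines_in_rec += 1
--             else:
--                 logical += 1
--                 if newlines_in_rec > 0:
--                     stitched += 1
--                     max_physical = max(max_physical, newlines_in_rec + 1)
--                 newlines_in_rec = 0
--         i += 1
--     # flush the final record (always present, even for empty text)
--     logical += 1
--     if newlines_in_rec > 0: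
--         stitched += 1
--         max_physical = max(max_physical, newlines_in_rec + 1)
--     stats = {
--         "physical_lines": total_newlines + 1,
--         "logical_lines": logical,
--         "stitched_records": stitched,
--         "max_physical_per_record": max_physical,
--     }
--     return text, stats
-- ===== Notes on version B (the rewrite author's own statement) =====
-- stated objective: alternative
-- what changed: A splits the text into physical lines, re-buffers and re-joins them into logical records and rebuilds the stitched text; B makes one flat pass over the characters tracking the quote state (consuming escaped "" pairs), counts unquoted newlines as record boundaries, and returns the input text itself as the stitched text.
import Mathlib
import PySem

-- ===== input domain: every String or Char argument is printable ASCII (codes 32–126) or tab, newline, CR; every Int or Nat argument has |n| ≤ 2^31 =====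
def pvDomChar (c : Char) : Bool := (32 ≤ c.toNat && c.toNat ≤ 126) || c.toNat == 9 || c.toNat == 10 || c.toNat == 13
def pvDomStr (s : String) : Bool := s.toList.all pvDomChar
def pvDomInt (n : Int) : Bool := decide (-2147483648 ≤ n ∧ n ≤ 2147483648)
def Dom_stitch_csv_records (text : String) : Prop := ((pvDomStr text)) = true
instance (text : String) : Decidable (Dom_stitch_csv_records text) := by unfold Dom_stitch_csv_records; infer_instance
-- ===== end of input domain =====

-- B replaces A's split-into-lines / rebuild pipeline by one flat character scan that only
-- counts record boundaries (the stitched text is the input itself); objective: alternative.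

-- ===== PORT A =====
-- process_line_for_quotes: the while loop over the line, escaped "" consumed in one step
def pvPlq : List Char → Bool → Bool
  | [], q => q
  | c :: rest, q =>
    if c = '"' then
      match _h : rest with
      | c2 :: rest2 => if c2 = '"' then pvPlq rest2 q else pvPlq rest (!q)
      | [] => pvPlq [] (!q)
    else pvPlq rest q
termination_by l _ => l.length
decreasing_by all_goals simp_all

-- one iteration of A's `for line in lines` loop;
-- state = (buf_parts, in_quotes, current_physical_count, logical_lines, stitched_records, max_physical)
def pvAStep (s : List (List Char) × Bool × Int × List (List Char) × Int × Int)
    (line : List Char) : List (List Char) × Bool × Int × List (List Char) × Int × Int :=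
  match s with
  | (buf, q, cur, log, st, mp) =>
    let cur2 := cur + 1
    let buf2 := if buf = [] then [line] else buf ++ [('\n' :: line)]   -- "\n" + line
    let q2 := pvPlq line q
    if q2 = false then
      ([], q2, 0, log ++ [PySem.Chars.join [] buf2],
       if cur2 > 1 then st + 1 else st,
       if cur2 > 1 then max mp cur2 else mp)
    else (buf2, q2, cur2, log, st, mp)

-- the trailing `if buf_parts:` flush of A
def pvAFin (s : List (List Char) × Bool × Int × List (List Char) × Int × Int) :
    List (List Char) × Int × Int :=
  match s with
  | (buf, _q, cur, log, st, mp) =>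
    (if buf = [] then log else log ++ [PySem.Chars.join [] buf],
     if buf = [] then st else (if cur > 1 then st + 1 else st),
     if buf = [] then mp else (if cur > 1 then max mp cur else mp))

def stitch_csv_records (text : String) : String × (List (String × Int)) :=
  let lines := PySem.Chars.splitOn text.toList ['\n']
  let physical : Int := lines.length
  let fin := pvAFin (lines.foldl pvAStep ([], false, 0, [], 0, 1))
  (String.ofList (PySem.Chars.join ['\n'] fin.1),
   [("physical_lines", physical), ("logical_lines", (fin.1.length : Int)),
    ("stitched_records", fin.2.1), ("max_physical_per_record", fin.2.2)])

-- ===== PORT B =====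
-- the single while loop of Source B over the characters of text;
-- returns (logical, newlines_in_rec, total_newlines, stitched, max_physical)
def pvScan : List Char → Bool → Int → Int → Int → Int → Int → Int × Int × Int × Int × Int
  | [], _q, logical, nl, tot, st, mp => (logical, nl, tot, st, mp)
  | c :: rest, q, logical, nl, tot, st, mp =>
    if c = '"' then
      match _h : rest with
      | c2 :: rest2 =>
        if c2 = '"' then pvScan rest2 q logical nl tot st mp
        else pvScan rest (!q) logical nl tot st mp
      | [] => pvScan [] (!q) logical nl tot st mp
    else if c = '\n' then
      (if q then pvScan rest q logical (nl + 1) (tot + 1) st mp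
       else pvScan rest q (logical + 1) 0 (tot + 1)
              (if nl > 0 then st + 1 else st)
              (if nl > 0 then max mp (nl + 1) else mp))
    else pvScan rest q logical nl tot st mp
termination_by l _ _ _ _ _ _ => l.length
decreasing_by all_goals simp_all

-- the flush of the final record in Source B; returns (logical, stitched, max_physical)
def pvBFin (r : Int × Int × Int × Int × Int) : Int × Int × Int :=
  (r.1 + 1,
   if r.2.1 > 0 then r.2.2.2.1 + 1 else r.2.2.2.1,
   if r.2.1 > 0 then max r.2.2.2.2 (r.2.1 + 1) else r.2.2.2.2)

def stitch_csv_records_alt (text : String) : String × (List (String × Int)) :=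
  let r := pvScan text.toList false 0 0 0 0 1
  let fin := pvBFin r
  (text,
   [("physical_lines", r.2.2.1 + 1), ("logical_lines", fin.1),
    ("stitched_records", fin.2.1), ("max_physical_per_record", fin.2.2)])

-- ===== PRECONDITION & SPEC =====
def Spec_stitch_csv_records (text : String) (out : String × (List (String × Int))) : Prop := out = stitch_csv_records_alt text
instance (text : String) (out : String × (List (String × Int))) : Decidable (Spec_stitch_csv_records text out) := by unfold Spec_stitch_csv_records; infer_instance

-- ===== CLAIM (what is proved, stated in full; the proofs are below) =====
def Claim_equal_stitch_csv_records : Prop := ∀ (text : String), Dom_stitch_csv_records text → Spec_stitch_csv_records text (stitch_csv_records text)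

-- ===== LEMMAS AND PROOFS =====

-- reference form of text.split("\n")
def pvSplitNL : List Char → List (List Char)
  | [] => [[]]
  | c :: rest => if c = '\n' then [] :: pvSplitNL rest else (pvSplitNL rest).modifyHead (c :: ·)

theorem pvSplitNL_ne_nil (l : List Char) : pvSplitNL l ≠ [] := by
  cases l with
  | nil => simp [pvSplitNL]
  | cons c rest =>
    simp only [pvSplitNL]
    split
    · simp
    · intro h
      have hne := pvSplitNL_ne_nil rest
      cases hs : pvSplitNL rest with
      | nil => exact hne hs
      | cons a t => rw [hs] at h; simp [List.modifyHead] at h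

theorem pvSplitOn_go_eq (l : List Char) : ∀ (fuel : Nat) (cur : List Char) (acc : List (List Char)),
    l.length < fuel →
    PySem.Chars.splitOn.go ['\n'] fuel l cur acc
      = acc.reverse ++ (pvSplitNL l).modifyHead (cur.reverse ++ ·) := by
  induction l with
  | nil =>
    intro fuel cur acc hf
    cases fuel with
    | zero => omega
    | succ f => simp [PySem.Chars.splitOn.go, pvSplitNL]
  | cons c rest ih =>
    intro fuel cur acc hf
    cases fuel with
    | zero => simp at hf
    | succ f =>
      obtain ⟨a, t, hs⟩ := List.exists_cons_of_ne_nil (pvSplitNL_ne_nil rest)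
      by_cases hc : c = '\n'
      · subst hc
        have hp : ['\n'].isPrefixOf ('\n' :: rest) = true := by simp [List.isPrefixOf]
        rw [PySem.Chars.splitOn.go, if_pos hp]
        simp only [List.length_singleton, List.drop_one, List.tail_cons]
        rw [ih f [] (cur.reverse :: acc) (by simp at hf; omega)]
        simp [pvSplitNL, hs]
      · have hp : ['\n'].isPrefixOf (c :: rest) = false := by
          simp [List.isPrefixOf]; intro h; exact absurd h.symm hc
        rw [PySem.Chars.splitOn.go, if_neg (by simp [hp])]
        rw [ih f (c :: cur) acc (by simp at hf; omega)]
        simp [pvSplitNL, hc, hs]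

theorem pvSplitOn_eq (l : List Char) : PySem.Chars.splitOn l ['\n'] = pvSplitNL l := by
  obtain ⟨a, t, hs⟩ := List.exists_cons_of_ne_nil (pvSplitNL_ne_nil l)
  rw [PySem.Chars.splitOn, pvSplitOn_go_eq l (l.length + 1) [] [] (by omega)]
  simp [hs]

theorem pvSplitNL_length (l : List Char) : (pvSplitNL l).length = l.count '\n' + 1 := by
  induction l with
  | nil => simp [pvSplitNL]
  | cons c rest ih =>
    by_cases hc : c = '\n' <;> simp [pvSplitNL, hc, ih]

theorem pvSplitNL_no_nl {l : List Char} (h : '\n' ∉ l) : pvSplitNL l = [l] := by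
  induction l with
  | nil => simp [pvSplitNL]
  | cons c rest ih =>
    simp only [List.mem_cons, not_or] at h
    simp [pvSplitNL, Ne.symm h.1, ih h.2]

theorem pvSplitNL_append {l1 : List Char} (l2 : List Char) (h : '\n' ∉ l1) :
    pvSplitNL (l1 ++ '\n' :: l2) = l1 :: pvSplitNL l2 := by
  induction l1 with
  | nil => simp [pvSplitNL]
  | cons c t ih =>
    simp only [List.mem_cons, not_or] at h
    simp [pvSplitNL, Ne.symm h.1, ih h.2]

theorem pvDecomp (l : List Char) : '\n' ∉ l ∨ ∃ l1 l2, l = l1 ++ '\n' :: l2 ∧ '\n' ∉ l1 := by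
  induction l with
  | nil => left; simp
  | cons c rest ih =>
    by_cases hc : c = '\n'
    · right; exact ⟨[], rest, by simp [hc], by simp⟩
    · rcases ih with h | ⟨l1, l2, hl, hn⟩
      · left; simp [Ne.symm hc, h]
      · right; exact ⟨c :: l1, l2, by simp [hl], by simp [Ne.symm hc, hn]⟩

theorem pvJoin_flatMap (h : List Char) (t : List (List Char)) :
    PySem.Chars.join ['\n'] (h :: t) = h ++ t.flatMap ('\n' :: ·) := by
  induction t generalizing h with
  | nil => simp [PySem.Chars.join_singleton]
  | cons b t2 ih => rw [PySem.Chars.join_cons_cons, ih b]; simp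

theorem pvJoin_splitNL (l : List Char) : PySem.Chars.join ['\n'] (pvSplitNL l) = l := by
  induction l with
  | nil => simp [pvSplitNL, PySem.Chars.join_singleton]
  | cons c rest ih =>
    obtain ⟨a, t, hs⟩ := List.exists_cons_of_ne_nil (pvSplitNL_ne_nil rest)
    by_cases hc : c = '\n'
    · subst hc
      rw [show pvSplitNL ('\n' :: rest) = [] :: pvSplitNL rest from by simp [pvSplitNL]]
      rw [hs] at ih ⊢
      rw [PySem.Chars.join_cons_cons]
      simp [ih]
    · simp only [pvSplitNL, if_neg hc]
      rw [hs] at ih ⊢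
      rw [List.modifyHead_cons]
      rw [pvJoin_flatMap] at ih ⊢
      simp [ih]

-- B's scan across a newline-free prefix only updates the quote flag, exactly as A's helper does
theorem pvScan_prefix (line : List Char) (q : Bool) :
    ∀ (r : List Char) (logical nl tot st mp : Int), '\n' ∉ line → r.head? ≠ some '"' →
    pvScan (line ++ r) q logical nl tot st mp = pvScan r (pvPlq line q) logical nl tot st mp := by
  induction line, q using pvPlq.induct with
  | case1 q => intro r logical nl tot st mp _ _; simp [pvPlq]
  | case2 q rest2 ih =>
    intro r logical nl tot st mp hnl hr2
    simp only [List.mem_cons, not_or] at hnl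
    rw [List.cons_append, List.cons_append, pvScan.eq_def, pvPlq.eq_def]
    exact ih r logical nl tot st mp hnl.2.2 hr2
  | case3 q c2 rest2 hc2 ih =>
    intro r logical nl tot st mp hnl hr2
    simp only [List.mem_cons, not_or] at hnl
    rw [List.cons_append, List.cons_append, pvScan.eq_def, pvPlq.eq_def]
    simp only [if_neg hc2]
    exact ih r logical nl tot st mp (by simp [List.mem_cons, hnl.2.1, hnl.2.2]) hr2
  | case4 q ih =>
    intro r logical nl tot st mp hnl hr2
    rw [List.cons_append, List.nil_append, pvScan.eq_def, pvPlq.eq_def]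
    cases r with
    | nil => simp [pvPlq, pvScan]
    | cons a str =>
      have ha : ¬ a = '"' := by simpa using fun h => hr2 (by simp [h])
      simp [if_neg ha, pvPlq]
  | case5 c rest q hc ih =>
    intro r logical nl tot st mp hnl hr2
    simp only [List.mem_cons, not_or] at hnl
    rw [List.cons_append, pvScan.eq_def, pvPlq.eq_def]
    simp only [if_neg hc, if_neg (Ne.symm hnl.1)]
    exact ih r logical nl tot st mp hnl.2 hr2

-- the no-newline case of the simulation: one line, both sides flush it identically
theorem pvSimBase (l : List Char) (q : Bool) (nl tot st mp : Int)
    (log buf : List (List Char)) (_hbuf : buf = [] ↔ nl = 0) (_hnl : 0 ≤ nl)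
    (h : '\n' ∉ l) :
    (pvBFin (pvScan l q (log.length : Int) nl tot st mp)
        = (((pvAFin ((pvSplitNL l).foldl pvAStep (buf, q, nl, log, st, mp))).1.length : Int),
           (pvAFin ((pvSplitNL l).foldl pvAStep (buf, q, nl, log, st, mp))).2)
      ∧ (pvScan l q (log.length : Int) nl tot st mp).2.2.1 = tot + (l.count '\n' : Int)) := by
  have hcnt : l.count '\n' = 0 := List.count_eq_zero.mpr h
  have hb : pvScan (l ++ []) q (log.length : Int) nl tot st mp
      = pvScan [] (pvPlq l q) (log.length : Int) nl tot st mp :=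
    pvScan_prefix l q [] _ _ _ _ _ h (by simp)
  rw [List.append_nil] at hb
  rw [pvSplitNL_no_nl h]
  simp only [List.foldl_cons, List.foldl_nil]
  rw [hb]
  have hg : ((nl : Int) + 1 > 1) = ((nl : Int) > 0) := propext (by constructor <;> omega)
  cases hq2 : pvPlq l q with
  | false =>
    simp [pvScan, pvAStep, pvAFin, pvBFin, hq2, hg, hcnt]
  | true =>
    by_cases hbe : buf = [] <;>
      (simp [pvScan, pvAStep, pvAFin, pvBFin, hq2, hbe, hg, hcnt])

-- the grand simulation: B's flat scan computes exactly A's flushed statistics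
theorem pvSim : ∀ (n : Nat) (l : List Char), l.length ≤ n →
    ∀ (q : Bool) (nl tot st mp : Int) (log buf : List (List Char)),
    (buf = [] ↔ nl = 0) → 0 ≤ nl →
    (pvBFin (pvScan l q (log.length : Int) nl tot st mp)
        = (((pvAFin ((pvSplitNL l).foldl pvAStep (buf, q, nl, log, st, mp))).1.length : Int),
           (pvAFin ((pvSplitNL l).foldl pvAStep (buf, q, nl, log, st, mp))).2)
      ∧ (pvScan l q (log.length : Int) nl tot st mp).2.2.1 = tot + (l.count '\n' : Int)) := by
  intro n
  induction n with
  | zero =>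
    intro l hlen q nl tot st mp log buf hbuf hnl
    have hl : l = [] := List.length_eq_zero_iff.mp (by omega)
    subst hl
    exact pvSimBase [] q nl tot st mp log buf hbuf hnl (by simp)
  | succ n ih =>
    intro l hlen q nl tot st mp log buf hbuf hnl
    rcases pvDecomp l with h | ⟨l1, l2, hl, hn1⟩
    · exact pvSimBase l q nl tot st mp log buf hbuf hnl h
    · subst hl
      have hlen2 : l2.length ≤ n := by simp at hlen; omega
      have hb : pvScan (l1 ++ '\n' :: l2) q (log.length : Int) nl tot st mp
          = pvScan ('\n' :: l2) (pvPlq l1 q) (log.length : Int) nl tot st mp :=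
        pvScan_prefix l1 q ('\n' :: l2) _ _ _ _ _ hn1 (by simp)
      rw [hb, pvSplitNL_append l2 hn1]
      simp only [List.foldl_cons]
      have hcnt : (l1 ++ '\n' :: l2).count '\n' = l2.count '\n' + 1 := by
        simp [List.count_append, List.count_eq_zero.mpr hn1]
      have hg : ((nl : Int) + 1 > 1) = ((nl : Int) > 0) := propext (by constructor <;> omega)
      cases hq2 : pvPlq l1 q with
      | false =>
        have hstep : pvScan ('\n' :: l2) false (log.length : Int) nl tot st mp
            = pvScan l2 false ((log.length : Int) + 1) 0 (tot + 1)
                (if nl > 0 then st + 1 else st) (if nl > 0 then max mp (nl + 1) else mp) := by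
          rw [pvScan.eq_def]; simp
        rw [hstep]
        simp only [pvAStep, hq2, if_true, hg]
        have hlog : ((log ++ [PySem.Chars.join []
            (if buf = [] then [l1] else buf ++ ['\n' :: l1])]).length : Int)
            = (log.length : Int) + 1 := by push_cast [List.length_append]; simp
        have hih := ih l2 hlen2 false 0 (tot + 1)
            (if nl + 1 > 1 then st + 1 else st) (if nl + 1 > 1 then max mp (nl + 1) else mp)
            (log ++ [PySem.Chars.join [] (if buf = [] then [l1] else buf ++ ['\n' :: l1])])
            [] (by simp) (by omega)
        rw [hlog] at hih
        simp only [hg] at hih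
        refine ⟨hih.1, ?_⟩
        rw [hih.2, hcnt]; push_cast; omega
      | true =>
        have hstep : pvScan ('\n' :: l2) true (log.length : Int) nl tot st mp
            = pvScan l2 true (log.length : Int) (nl + 1) (tot + 1) st mp := by
          rw [pvScan.eq_def]; simp
        rw [hstep]
        simp only [pvAStep, hq2, if_neg (by simp : ¬ (true = false)), hg]
        have hbuf2 : (if buf = [] then [l1] else buf ++ ['\n' :: l1]) ≠ [] := by
          split <;> simp
        have hih := ih l2 hlen2 true (nl + 1) (tot + 1) st mp log
            (if buf = [] then [l1] else buf ++ ['\n' :: l1])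
            (by simp [hbuf2]; omega) (by omega)
        refine ⟨hih.1, ?_⟩
        rw [hih.2, hcnt]; push_cast; omega

-- reconstruction: the joined logical records are the original text
def pvV (log buf : List (List Char)) : List Char :=
  PySem.Chars.join ['\n'] (log ++ (if buf = [] then [] else [PySem.Chars.join [] buf]))

theorem pvJoin_snoc (xs : List (List Char)) (y : List Char) :
    PySem.Chars.join ['\n'] (xs ++ [y])
      = if xs = [] then y else PySem.Chars.join ['\n'] xs ++ '\n' :: y := by
  cases xs with
  | nil => simp [PySem.Chars.join_singleton]
  | cons h t => simp [pvJoin_flatMap, List.flatMap_append]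

theorem pvJoinNil_snoc (xs : List (List Char)) (y : List Char) :
    PySem.Chars.join [] (xs ++ [y]) = PySem.Chars.join [] xs ++ y := by
  induction xs with
  | nil => simp [PySem.Chars.join_singleton, PySem.Chars.join_nil]
  | cons h t ih =>
    cases t with
    | nil => simp [PySem.Chars.join_singleton, PySem.Chars.join_cons_cons]
    | cons b t2 =>
      have e1 : (h :: b :: t2) ++ [y] = h :: (b :: (t2 ++ [y])) := by simp
      have e2 : (b :: t2) ++ [y] = b :: (t2 ++ [y]) := by simp
      rw [e1, PySem.Chars.join_cons_cons, ← e2, ih, PySem.Chars.join_cons_cons]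
      simp

theorem pvAFin_join (s : List (List Char) × Bool × Int × List (List Char) × Int × Int) :
    PySem.Chars.join ['\n'] (pvAFin s).1 = pvV s.2.2.2.1 s.1 := by
  obtain ⟨buf, q, cur, log, st, mp⟩ := s
  by_cases hb : buf = [] <;> simp [pvAFin, pvV, hb]

theorem pvV_step (s : List (List Char) × Bool × Int × List (List Char) × Int × Int)
    (line : List Char) :
    pvV (pvAStep s line).2.2.2.1 (pvAStep s line).1
      = pvV s.2.2.2.1 s.1 ++ (if s.2.2.2.1 = [] ∧ s.1 = [] then line else '\n' :: line) := by
  obtain ⟨buf, q, cur, log, st, mp⟩ := s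
  by_cases hb : buf = []
  · subst hb
    have hkey : PySem.Chars.join ['\n'] (log ++ [PySem.Chars.join [] [line]])
        = PySem.Chars.join ['\n'] (log ++ []) ++ (if log = [] then line else '\n' :: line) := by
      rw [pvJoin_snoc]
      by_cases hl : log = [] <;> simp [hl, PySem.Chars.join_singleton, PySem.Chars.join_nil]
    cases hq2 : pvPlq line q with
    | false => simp only [pvAStep, hq2]; simpa [pvV] using hkey
    | true =>
      simp only [pvAStep, hq2, if_neg (by simp : ¬ (true = false))]
      simpa [pvV] using hkey
  · have hkey : PySem.Chars.join ['\n'] (log ++ [PySem.Chars.join [] (buf ++ ['\n' :: line])])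
        = PySem.Chars.join ['\n'] (log ++ [PySem.Chars.join [] buf]) ++ '\n' :: line := by
      rw [pvJoinNil_snoc, pvJoin_snoc, pvJoin_snoc]
      by_cases hl : log = [] <;> simp [hl]
    cases hq2 : pvPlq line q with
    | false =>
      simp only [pvAStep, hq2, if_neg hb]
      simpa [pvV, hb] using hkey
    | true =>
      simp only [pvAStep, hq2, if_neg (by simp : ¬ (true = false)), if_neg hb]
      have hbuf2 : buf ++ ['\n' :: line] ≠ [] := by simp
      simpa [pvV, hb, hbuf2] using hkey

theorem pvAStep_ne (s : List (List Char) × Bool × Int × List (List Char) × Int × Int)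
    (line : List Char) :
    (pvAStep s line).2.2.2.1 ≠ [] ∨ (pvAStep s line).1 ≠ [] := by
  obtain ⟨buf, q, cur, log, st, mp⟩ := s
  cases hq2 : pvPlq line q with
  | false => left; simp [pvAStep, hq2]
  | true =>
    right
    simp only [pvAStep, hq2, if_neg (by simp : ¬ (true = false))]
    split <;> simp

theorem pvV_fold : ∀ (lines : List (List Char))
    (s : List (List Char) × Bool × Int × List (List Char) × Int × Int),
    (s.2.2.2.1 ≠ [] ∨ s.1 ≠ []) →
    pvV (lines.foldl pvAStep s).2.2.2.1 (lines.foldl pvAStep s).1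
      = pvV s.2.2.2.1 s.1 ++ lines.flatMap (fun ln => '\n' :: ln) := by
  intro lines
  induction lines with
  | nil => intro s _; simp
  | cons line rest ih =>
    intro s hne
    simp only [List.foldl_cons]
    rw [ih (pvAStep s line) (pvAStep_ne s line), pvV_step s line]
    have hcond : ¬ (s.2.2.2.1 = [] ∧ s.1 = []) := by tauto
    simp [if_neg hcond]

theorem pvText_reconstruct (l : List Char) :
    PySem.Chars.join ['\n'] ((pvAFin ((pvSplitNL l).foldl pvAStep ([], false, 0, [], 0, 1))).1) = l := by
  obtain ⟨h, t, hs⟩ := List.exists_cons_of_ne_nil (pvSplitNL_ne_nil l)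
  rw [pvAFin_join, hs]
  simp only [List.foldl_cons]
  rw [pvV_fold t _ (pvAStep_ne ([], false, 0, [], 0, 1) h)]
  have h1 : pvV (pvAStep ([], false, 0, [], 0, 1) h).2.2.2.1 (pvAStep ([], false, 0, [], 0, 1) h).1 = h := by
    rw [pvV_step ([], false, 0, [], 0, 1) h]
    simp [pvV, PySem.Chars.join_nil]
  rw [h1, ← pvJoin_flatMap, ← hs, pvJoin_splitNL]

-- ===== VERDICT (by name: the statement is the Claim_ definition above) =====
theorem stitch_csv_records_spec : Claim_equal_stitch_csv_records := by
  intro text _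
  unfold Spec_stitch_csv_records
  show stitch_csv_records text = stitch_csv_records_alt text
  unfold stitch_csv_records stitch_csv_records_alt
  rw [pvSplitOn_eq]
  have hsim := pvSim (text.toList.length) text.toList le_rfl false 0 0 0 1 [] []
      (by simp) le_rfl
  simp only [List.length_nil, Nat.cast_zero] at hsim
  have htext : String.ofList (PySem.Chars.join ['\n']
      ((pvAFin ((pvSplitNL text.toList).foldl pvAStep ([], false, 0, [], 0, 1))).1)) = text := by
    rw [pvText_reconstruct, String.ofList_toList]
  have hphys : ((pvSplitNL text.toList).length : Int)
      = (pvScan text.toList false 0 0 0 0 1).2.2.1 + 1 := by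
    rw [hsim.2, pvSplitNL_length]; push_cast; omega
  refine Prod.ext ?_ ?_
  · exact htext
  · have h1 := congrArg Prod.fst hsim.1
    have h2 := congrArg (fun p => p.2.1) hsim.1
    have h3 := congrArg (fun p => p.2.2) hsim.1
    simp only [pvBFin] at h1 h2 h3
    simp [pvBFin, hphys, h1, h2, h3]
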